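-- pv_equiv track=rewrite | github.com/polmontou/advent_of_code | src/day2/day2-1.py | find_int_backward
-- ===== SOURCE A (Python) =====
-- digits = [0,1,2,3,4,5,6,7,8,9]
--
-- def find_int_backward (text, index):
--     int_backward = ""
--     int_forward = ""
--     i = index
--     founded_int_once = False
--     stop = False
--
--     while i != -1 and not stop:
--         digit_found = False
--
--         for j, digit in enumerate(digits):
--             if  str(digit) == text[i]:
--                 int_backward += text[i]
--                 digit_found = True
--                 founded_int_once = True
--                 break
--
--         if founded_int_once:
--             if not digit_found:
--                 stop = True
--         i -= 1
--
--     i = len(int_backward)-1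
--     while i != -1:
--         int_forward += int_backward[i]
--         i -=1
--
--     return int(int_forward)
-- ===== SOURCE B (Python) =====
-- def find_int_backward(text, index):
--     val = None
--     cur = None
--     for c in text[:index + 1]:
--         if '0' <= c <= '9':
--             cur = (cur if cur is not None else "") + c
--         else:
--             if cur is not None:
--                 val = cur
--             cur = None
--     if cur is not None:
--         val = cur
--     return int(val)
-- ===== Notes on version B (the rewrite author's own statement) =====
-- stated objective: simpler
-- what changed: A scans backward character by character (with an inner loop comparing against str(digit) for each of the ten digits) collecting the run in reverse and then reverses it with a second hand-written loop; B makes a single forward pass over text[:index+1] keeping the current and the last completed digit run, so no backward indexing and no reversal step is needed.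
import Mathlib
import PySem

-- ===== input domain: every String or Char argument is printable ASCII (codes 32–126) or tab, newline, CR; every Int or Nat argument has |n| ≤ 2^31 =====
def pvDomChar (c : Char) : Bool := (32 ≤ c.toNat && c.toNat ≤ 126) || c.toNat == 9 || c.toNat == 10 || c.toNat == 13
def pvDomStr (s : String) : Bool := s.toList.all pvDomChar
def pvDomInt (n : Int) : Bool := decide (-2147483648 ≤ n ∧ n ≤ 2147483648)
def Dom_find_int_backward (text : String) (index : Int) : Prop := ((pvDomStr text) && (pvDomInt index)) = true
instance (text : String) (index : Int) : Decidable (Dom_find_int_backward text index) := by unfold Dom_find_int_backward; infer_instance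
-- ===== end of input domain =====

-- B replaces A's backward scan + manual string reversal by a single forward pass that keeps the
-- current and the last completed digit run (objective: simpler one-pass decomposition).

-- shared helper: '0' <= c <= '9'
def isDig (c : Char) : Bool := decide ('0' ≤ c ∧ c ≤ '9')

-- ===== PORT A =====
def pvDigits : List Int := [0,1,2,3,4,5,6,7,8,9]

-- first while loop of A; `none` = Python IndexError on text[i]
def faLoop (cs : List Char) : Nat → Int → List Char → Bool → Option (List Char)
  | 0, _, _, _ => none
  | fuel+1, i, acc, founded =>
    if i = -1 then some acc
    else
      match PySem.List.pyGet? cs i with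
      | none => none
      | some c =>
        -- for j, digit in enumerate(digits): if str(digit) == text[i]: … break
        if pvDigits.any (fun d => PySem.Int.toStr d == String.ofList [c]) then
          faLoop cs fuel (i-1) (acc ++ [c]) true
        else if founded then some acc      -- stop = True; the loop then exits
        else faLoop cs fuel (i-1) acc founded

-- second while loop of A: reverse int_backward by hand (i = len-1 … 0)
def faRev (bw : List Char) : Nat → List Char → List Char
  | 0, out => out
  | k+1, out => faRev bw k (out ++ [bw.getD k ' '])

def find_int_backward (text : String) (index : Int) : Int :=
  let cs := text.toList
  match faLoop cs ((index + cs.length + 2).toNat + cs.length + 2) index [] false with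
  | none => 0                                    -- Python raises IndexError (outside Pre_)
  | some bw =>
    let fw := faRev bw bw.length []
    (PySem.Int.ofStr? (String.ofList fw)).getD 0     -- int(); none = ValueError (outside Pre_)

-- ===== PORT B =====
def fbStep (s : Option (List Char) × Option (List Char)) (c : Char) :
    Option (List Char) × Option (List Char) :=
  if isDig c then (s.1, some (s.2.getD [] ++ [c]))
  else ((match s.2 with | some t => some t | none => s.1), none)

def find_int_backward_alt (text : String) (index : Int) : Int :=
  let p := PySem.List.slice text.toList none (some (index + 1))   -- text[:index+1]
  let s := p.foldl fbStep (none, none)                            -- (val, cur)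
  match (match s.2 with | some t => some t | none => s.1) with
  | none => 0                                    -- Python raises TypeError on int(None) (outside Pre_)
  | some t => (PySem.Int.ofStr? (String.ofList t)).getD 0

-- ===== PRECONDITION & SPEC =====
-- Pre_ is exactly where the Python A returns normally: the (wrapped) index is in range and not -1,
-- a digit occurs at or before it, and for a negative index the backward scan stops inside the string
-- (a non-digit both after and before the scanned digit run) instead of running past index 0.
def Pre_find_int_backward (text : String) (index : Int) : Prop :=
  let cs := text.toList
  let n : Int := cs.length
  let e := if 0 ≤ index then index else index + n
  index ≠ -1 ∧ 0 ≤ e ∧ e < n ∧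
  (let q := (cs.take (e.toNat + 1)).reverse
   q.any isDig = true ∧
   (0 ≤ index ∨ ((q.dropWhile (fun c => !isDig c)).dropWhile isDig) ≠ []))
instance (text : String) (index : Int) : Decidable (Pre_find_int_backward text index) := by
  unfold Pre_find_int_backward; infer_instance

def pvWitness_find_int_backward : String × Int := ("a12", 2)

def Spec_find_int_backward (text : String) (index : Int) (out : Int) : Prop := out = find_int_backward_alt text index
instance (text : String) (index : Int) (out : Int) : Decidable (Spec_find_int_backward text index out) := by unfold Spec_find_int_backward; infer_instance

-- ===== CLAIM (what is proved, stated in full; the proofs are below) =====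
def Claim_equal_find_int_backward : Prop := ∀ (text : String) (index : Int), Dom_find_int_backward text index → Pre_find_int_backward text index → Spec_find_int_backward text index (find_int_backward text index)

-- ===== LEMMAS AND PROOFS =====

theorem char_le_toNat (d c : Char) : d ≤ c ↔ d.toNat ≤ c.toNat := by
  rw [Char.le_def]; exact UInt32.le_iff_toNat_le ..

theorem char_eq_toNat (d c : Char) : d = c ↔ d.toNat = c.toNat :=
  ⟨fun h => by rw [h], fun h => Char.ext (UInt32.toNat.inj h)⟩

theorem any_digits_eq (c : Char) :
    (pvDigits.any (fun d => PySem.Int.toStr d == String.ofList [c])) = isDig c := by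
  have key : ∀ d : Char, (String.ofList [d] == String.ofList [c]) = decide (d.toNat = c.toNat) := by
    intro d
    rw [Bool.beq_eq_decide_eq]
    apply decide_eq_decide.mpr
    constructor
    · intro h'
      have := congrArg String.toList h'
      simp at this
      rw [this]
    · intro h
      rw [(char_eq_toNat d c).mpr h]
  have t0 : PySem.Int.toStr 0 = String.ofList ['0'] := by decide
  have t1 : PySem.Int.toStr 1 = String.ofList ['1'] := by decide
  have t2 : PySem.Int.toStr 2 = String.ofList ['2'] := by decide
  have t3 : PySem.Int.toStr 3 = String.ofList ['3'] := by decide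
  have t4 : PySem.Int.toStr 4 = String.ofList ['4'] := by decide
  have t5 : PySem.Int.toStr 5 = String.ofList ['5'] := by decide
  have t6 : PySem.Int.toStr 6 = String.ofList ['6'] := by decide
  have t7 : PySem.Int.toStr 7 = String.ofList ['7'] := by decide
  have t8 : PySem.Int.toStr 8 = String.ofList ['8'] := by decide
  have t9 : PySem.Int.toStr 9 = String.ofList ['9'] := by decide
  have rhs : isDig c = decide (48 ≤ c.toNat ∧ c.toNat ≤ 57) := by
    unfold isDig
    apply decide_eq_decide.mpr
    rw [char_le_toNat, char_le_toNat,
        show ('0').toNat = 48 from by decide, show ('9').toNat = 57 from by decide]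
  simp only [pvDigits, List.any, t0, t1, t2, t3, t4, t5, t6, t7, t8, t9, key, rhs,
    Bool.or_false]
  rw [show ('0').toNat = 48 from by decide, show ('1').toNat = 49 from by decide,
      show ('2').toNat = 50 from by decide, show ('3').toNat = 51 from by decide,
      show ('4').toNat = 52 from by decide, show ('5').toNat = 53 from by decide,
      show ('6').toNat = 54 from by decide, show ('7').toNat = 55 from by decide,
      show ('8').toNat = 56 from by decide, show ('9').toNat = 57 from by decide]
  simp only [← Bool.decide_or]
  apply decide_eq_decide.mpr
  omega

theorem take_succ_reverse (cs : List Char) (k : Nat) (hk : k < cs.length) :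
    (cs.take (k+1)).reverse = cs[k] :: (cs.take k).reverse := by
  rw [List.take_add_one, List.getElem?_eq_getElem hk]
  simp

theorem collect_pos (cs : List Char) (k : Nat) (fuel : Nat) (acc : List Char)
    (hk : k ≤ cs.length) (hf : k < fuel) :
    faLoop cs fuel ((k : Int) - 1) acc true
      = some (acc ++ ((cs.take k).reverse.takeWhile isDig)) := by
  induction k generalizing fuel acc with
  | zero =>
    obtain ⟨f, rfl⟩ : ∃ f, fuel = f + 1 := ⟨fuel - 1, by omega⟩
    simp [faLoop]
  | succ k ih =>
    obtain ⟨f, rfl⟩ : ∃ f, fuel = f + 1 := ⟨fuel - 1, by omega⟩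
    have hidx : ((k+1 : Nat) : Int) - 1 = ((k : Nat) : Int) := by push_cast; ring
    have hklen : k < cs.length := by omega
    rw [faLoop, hidx]
    rw [if_neg (by omega)]
    rw [PySem.List.pyGet?_natCast, List.getElem?_eq_getElem hklen]
    simp only [any_digits_eq, take_succ_reverse cs k hklen]
    by_cases hd : isDig cs[k]
    · rw [if_pos hd, ih f (acc ++ [cs[k]]) (by omega) (by omega),
        List.takeWhile_cons_of_pos hd]
      simp
    · rw [if_neg hd, List.takeWhile_cons_of_neg hd]
      simp

theorem collect_neg (cs : List Char) (k : Nat) (fuel : Nat) (acc : List Char)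
    (hk : k < cs.length) (hf : k < fuel)
    (hstop : (cs.take k).reverse.dropWhile isDig ≠ []) :
    faLoop cs fuel ((k : Int) - 1 - cs.length) acc true
      = some (acc ++ ((cs.take k).reverse.takeWhile isDig)) := by
  induction k generalizing fuel acc with
  | zero => simp at hstop
  | succ k ih =>
    obtain ⟨f, rfl⟩ : ∃ f, fuel = f + 1 := ⟨fuel - 1, by omega⟩
    have hklen : k < cs.length := by omega
    have hidx : ((k+1 : Nat) : Int) - 1 - cs.length = -(((cs.length - k : Nat)) : Int) := by
      omega
    rw [faLoop, hidx]
    rw [if_neg (by omega)]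
    rw [PySem.List.pyGet?_neg_natCast cs (cs.length - k) (by omega) (by omega)]
    have hsub : cs.length - (cs.length - k) = k := by omega
    rw [hsub, List.getElem?_eq_getElem hklen]
    simp only [any_digits_eq]
    rw [take_succ_reverse cs k hklen] at hstop ⊢
    by_cases hd : isDig cs[k]
    · have hidx2 : -(((cs.length - k : Nat)) : Int) - 1 = ((k : Nat) : Int) - 1 - cs.length := by
        omega
      rw [if_pos hd, hidx2, ih f (acc ++ [cs[k]]) (by omega) (by omega)
          (by rwa [List.dropWhile_cons_of_pos hd] at hstop),
        List.takeWhile_cons_of_pos hd]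
      simp
    · rw [if_neg hd, List.takeWhile_cons_of_neg hd]
      simp

theorem skip_pos (cs : List Char) (k : Nat) (fuel : Nat)
    (hk : k ≤ cs.length) (hf : k + 1 < fuel) :
    faLoop cs fuel ((k : Int) - 1) [] false
      = some (((cs.take k).reverse.dropWhile (fun c => !isDig c)).takeWhile isDig) := by
  induction k generalizing fuel with
  | zero =>
    obtain ⟨f, rfl⟩ : ∃ f, fuel = f + 1 := ⟨fuel - 1, by omega⟩
    simp [faLoop]
  | succ k ih =>
    obtain ⟨f, rfl⟩ : ∃ f, fuel = f + 1 := ⟨fuel - 1, by omega⟩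
    have hidx : ((k+1 : Nat) : Int) - 1 = ((k : Nat) : Int) := by push_cast; ring
    have hklen : k < cs.length := by omega
    rw [faLoop, hidx, if_neg (by omega)]
    rw [PySem.List.pyGet?_natCast, List.getElem?_eq_getElem hklen]
    simp only [any_digits_eq, take_succ_reverse cs k hklen]
    by_cases hd : isDig cs[k]
    · rw [if_pos hd, show ([] : List Char) ++ [cs[k]] = [cs[k]] from rfl,
        collect_pos cs k f [cs[k]] (by omega) (by omega),
        List.dropWhile_cons_of_neg (by simp [hd]), List.takeWhile_cons_of_pos hd]
      simp
    · rw [if_neg hd, if_neg (by simp), ih f (by omega) (by omega),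
        List.dropWhile_cons_of_pos (by simp [hd])]

theorem skip_neg (cs : List Char) (k : Nat) (fuel : Nat)
    (hk : k < cs.length) (hf : k + 1 < fuel)
    (hdig : (cs.take k).reverse.any isDig = true)
    (hstop : (((cs.take k).reverse.dropWhile (fun c => !isDig c)).dropWhile isDig) ≠ []) :
    faLoop cs fuel ((k : Int) - 1 - cs.length) [] false
      = some (((cs.take k).reverse.dropWhile (fun c => !isDig c)).takeWhile isDig) := by
  induction k generalizing fuel with
  | zero => simp at hdig
  | succ k ih =>
    obtain ⟨f, rfl⟩ : ∃ f, fuel = f + 1 := ⟨fuel - 1, by omega⟩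
    have hklen : k < cs.length := by omega
    have hidx : ((k+1 : Nat) : Int) - 1 - cs.length = -(((cs.length - k : Nat)) : Int) := by
      omega
    rw [faLoop, hidx, if_neg (by omega)]
    rw [PySem.List.pyGet?_neg_natCast cs (cs.length - k) (by omega) (by omega)]
    have hsub : cs.length - (cs.length - k) = k := by omega
    rw [hsub, List.getElem?_eq_getElem hklen]
    simp only [any_digits_eq]
    rw [take_succ_reverse cs k hklen] at hdig hstop ⊢
    by_cases hd : isDig cs[k]
    · rw [List.dropWhile_cons_of_neg (by simp [hd])] at hstop ⊢
      rw [List.dropWhile_cons_of_pos hd] at hstop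
      have hidx2 : -(((cs.length - k : Nat)) : Int) - 1 = ((k : Nat) : Int) - 1 - cs.length := by
        omega
      rw [if_pos hd, hidx2, show ([] : List Char) ++ [cs[k]] = [cs[k]] from rfl,
        collect_neg cs k f [cs[k]] hklen (by omega) hstop,
        List.takeWhile_cons_of_pos hd]
      simp
    · rw [List.dropWhile_cons_of_pos (by simp [hd])] at hstop ⊢
      have hdig' : (cs.take k).reverse.any isDig = true := by
        simpa [hd] using hdig
      have hidx2 : -(((cs.length - k : Nat)) : Int) - 1 = ((k : Nat) : Int) - 1 - cs.length := by
        omega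
      rw [if_neg hd, if_neg (by simp), hidx2, ih f (by omega) (by omega) hdig' hstop]

theorem faRev_eq (bw : List Char) (k : Nat) (out : List Char) (hk : k ≤ bw.length) :
    faRev bw k out = out ++ (bw.take k).reverse := by
  induction k generalizing out with
  | zero => simp [faRev]
  | succ k ih =>
    have hklen : k < bw.length := by omega
    rw [faRev, ih _ (by omega), take_succ_reverse bw k hklen,
      List.getD_eq_getElem bw ' ' hklen]
    simp

def optOf (l : List Char) : Option (List Char) := if l = [] then none else some l

theorem optOf_getD (l : List Char) : (optOf l).getD [] = l := by
  unfold optOf; split <;> simp_all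

theorem optOf_some (l : List Char) (h : l ≠ []) : optOf l = some l := by
  unfold optOf; simp [h]

theorem fold_eq (p : List Char) :
    p.foldl fbStep (none, none)
      = (optOf ((((p.reverse.dropWhile isDig).dropWhile (fun c => !isDig c)).takeWhile isDig).reverse),
         optOf ((p.reverse.takeWhile isDig).reverse)) := by
  induction p using List.reverseRecOn with
  | nil => simp [optOf]
  | append_singleton p c ih =>
    rw [List.foldl_append, ih]
    simp only [List.foldl_cons, List.foldl_nil, List.reverse_append, List.reverse_cons,
      List.reverse_nil, List.nil_append, List.cons_append]
    unfold fbStep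
    by_cases hd : isDig c
    · rw [if_pos hd]
      rw [List.dropWhile_cons_of_pos hd, List.takeWhile_cons_of_pos hd]
      simp only [List.reverse_cons]
      rw [optOf_getD,
        optOf_some ((List.takeWhile isDig p.reverse).reverse ++ [c]) (by simp)]
    · rw [if_neg hd]
      rw [List.dropWhile_cons_of_neg hd,
        List.dropWhile_cons_of_pos (p := fun c => !isDig c) (a := c) (l := p.reverse)
          (by simp [hd]),
        List.takeWhile_cons_of_neg hd]
      simp only [List.reverse_nil, Prod.mk.injEq]
      refine ⟨?_, by simp [optOf]⟩
      rcases hrev : p.reverse with _ | ⟨h, t⟩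
      · simp [optOf]
      · by_cases hh : isDig h
        · rw [List.takeWhile_cons_of_pos hh, List.dropWhile_cons_of_pos hh,
            List.dropWhile_cons_of_neg (p := fun c => !isDig c) (a := h) (l := t)
              (by simp [hh]), List.takeWhile_cons_of_pos hh]
          simp only [List.reverse_cons]
          rw [optOf_some ((List.takeWhile isDig t).reverse ++ [h]) (by simp)]
        · rw [List.takeWhile_cons_of_neg hh, List.dropWhile_cons_of_neg hh]
          simp [optOf]

theorem nonempty_run (t : List Char) (h : t.any isDig = true) :
    (t.dropWhile (fun c => !isDig c)).takeWhile isDig ≠ [] := by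
  induction t with
  | nil => simp at h
  | cons c r ih =>
    by_cases hc : isDig c
    · rw [List.dropWhile_cons_of_neg (by simp [hc]), List.takeWhile_cons_of_pos hc]
      simp
    · rw [List.dropWhile_cons_of_pos (p := fun c => !isDig c) (a := c) (l := r) (by simp [hc])]
      exact ih (by simpa [hc] using h)

theorem val_eq (q : List Char) (hq : q.any isDig = true) :
    (match optOf ((q.takeWhile isDig).reverse) with
     | some t => some t
     | none => optOf ((((q.dropWhile isDig).dropWhile (fun c => !isDig c)).takeWhile isDig).reverse))
    = some (((q.dropWhile (fun c => !isDig c)).takeWhile isDig).reverse) := by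
  rcases q with _ | ⟨h, t⟩
  · simp at hq
  · by_cases hh : isDig h
    · rw [List.takeWhile_cons_of_pos hh,
        List.dropWhile_cons_of_neg (p := fun c => !isDig c) (a := h) (l := t) (by simp [hh]),
        List.takeWhile_cons_of_pos hh]
      simp only [List.reverse_cons]
      rw [optOf_some ((List.takeWhile isDig t).reverse ++ [h]) (by simp)]
    · rw [List.takeWhile_cons_of_neg hh, List.dropWhile_cons_of_neg hh,
        List.dropWhile_cons_of_pos (p := fun c => !isDig c) (a := h) (l := t) (by simp [hh])]
      have hrun := nonempty_run t (by simpa [hh] using hq)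
      rw [show optOf (([] : List Char).reverse) = none from rfl]
      exact optOf_some _ (by simpa using hrun)

theorem match_some_red (X : List Char) :
    (match (some X : Option (List Char)) with
     | none => (0 : Int)
     | some bw => (PySem.Int.ofStr? (String.ofList (faRev bw bw.length []))).getD 0)
    = (PySem.Int.ofStr? (String.ofList (faRev X X.length []))).getD 0 := rfl

theorem bres (p : List Char) (hq : p.reverse.any isDig = true) :
    (match (match (p.foldl fbStep (none, none)).2 with
            | some t => some t
            | none => (p.foldl fbStep (none, none)).1) with
     | none => (0 : Int)
     | some t => (PySem.Int.ofStr? (String.ofList t)).getD 0)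
    = (PySem.Int.ofStr? (String.ofList
        (((p.reverse.dropWhile (fun c => !isDig c)).takeWhile isDig).reverse))).getD 0 := by
  have h2 : (p.foldl fbStep (none, none)).2
      = optOf ((p.reverse.takeWhile isDig).reverse) := by rw [fold_eq]
  have h1 : (p.foldl fbStep (none, none)).1
      = optOf ((((p.reverse.dropWhile isDig).dropWhile (fun c => !isDig c)).takeWhile isDig).reverse) := by
    rw [fold_eq]
  rw [h1, h2, val_eq _ hq]

-- ===== VERDICT (by name: the statement is the Claim_ definition above) =====
theorem find_int_backward_spec : Claim_equal_find_int_backward := by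
  intro text index _hdom hpre
  simp only [Pre_find_int_backward] at hpre
  obtain ⟨hne, he0, hen, hq, hcase⟩ := hpre
  have hA : find_int_backward text index =
      (match faLoop text.toList ((index + text.toList.length + 2).toNat + text.toList.length + 2)
          index [] false with
       | none => (0 : Int)
       | some bw => (PySem.Int.ofStr? (String.ofList (faRev bw bw.length []))).getD 0) := rfl
  have hB : find_int_backward_alt text index =
      (match (match (((PySem.List.slice text.toList none (some (index + 1))).foldl
                fbStep (none, none)).2) with
              | some t => some t
              | none => (((PySem.List.slice text.toList none (some (index + 1))).foldl
                fbStep (none, none)).1)) with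
       | none => (0 : Int)
       | some t => (PySem.Int.ofStr? (String.ofList t)).getD 0) := rfl
  show find_int_backward text index = find_int_backward_alt text index
  rw [hA, hB]
  by_cases hs : 0 ≤ index
  · rw [if_pos hs] at he0 hen hq
    have hkl : index.toNat + 1 ≤ text.toList.length := by omega
    have hidx : index = ((index.toNat + 1 : Nat) : Int) - 1 := by omega
    have hsl : PySem.List.slice text.toList none (some (index + 1))
        = text.toList.take (index.toNat + 1) := by
      rw [PySem.List.slice_to text.toList (by omega)]
      congr 1
      omega
    rw [bres _ (by rw [hsl]; exact hq)]
    conv_lhs => rw [hidx]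
    rw [skip_pos text.toList (index.toNat + 1) _ hkl (by omega), match_some_red,
      faRev_eq _ _ _ (le_refl _), List.take_length, List.nil_append, hsl]
  · rw [if_neg hs] at he0 hen hq hcase
    have hstop := hcase.resolve_left hs
    have hkl : (index + text.toList.length).toNat + 1 < text.toList.length := by omega
    have hidx : index = (((index + text.toList.length).toNat + 1 : Nat) : Int) - 1
        - text.toList.length := by omega
    have hsl : PySem.List.slice text.toList none (some (index + 1))
        = text.toList.take ((index + text.toList.length).toNat + 1) := by
      have hkk : index + 1
          = -(((text.toList.length - ((index + text.toList.length).toNat + 1) : Nat)) : Int) := by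
        omega
      rw [hkk, PySem.List.slice_to_neg_natCast text.toList
          (text.toList.length - ((index + text.toList.length).toNat + 1)) (by omega)]
      congr 1
      omega
    rw [bres _ (by rw [hsl]; exact hq)]
    conv_lhs => rw [hidx]
    rw [skip_neg text.toList ((index + text.toList.length).toNat + 1) _ hkl (by omega) hq hstop,
      match_some_red, faRev_eq _ _ _ (le_refl _), List.take_length, List.nil_append, hsl]
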